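-- pv_equiv track=rewrite | github.com/RudolfCardinal/pythonlib | cardinal_pythonlib/spreadsheets.py | colnum_zb_from_alphacol
-- ===== SOURCE A (Python) =====
-- def colnum_zb_from_alphacol(alphacol: str) -> int:
--     """
--     Reverses :func:`column_lettering`, generating a zero-based column index
--     from an alphabetical name (A to Z, AA to AZ, etc.).
--     """
--     base = 26
--     zero_char = ord("A")
--     total = 0
--     reversed_chars = alphacol[::-1]
--     for pos, char in enumerate(reversed_chars):
--         digit_value = ord(char) - zero_char  # e.g. 0 for A, 25 for Z
--         assert 0 <= digit_value < base
--         if pos > 0: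
--             digit_value += 1
--         total += digit_value * pow(base, pos)
--     return total
-- ===== SOURCE B (Python) =====
-- def colnum_zb_from_alphacol(alphacol: str) -> int:
--     """Horner-style single forward pass: each letter is a base-26 digit 1..26."""
--     total = 0
--     for char in alphacol:
--         digit = ord(char) - ord("A") + 1  # 1 for A, 26 for Z
--         assert 1 <= digit <= 26
--         total = total * 26 + digit
--     return total - 1 if alphacol else 0
-- ===== Notes on version B (the rewrite author's own statement) =====
-- stated objective: simpler
-- what changed: Single forward Horner pass (total = total*26 + digit 1..26, one final -1) instead of reversing the string and summing per-position pow(26,pos) with a pos>0 bump.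
import Mathlib
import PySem

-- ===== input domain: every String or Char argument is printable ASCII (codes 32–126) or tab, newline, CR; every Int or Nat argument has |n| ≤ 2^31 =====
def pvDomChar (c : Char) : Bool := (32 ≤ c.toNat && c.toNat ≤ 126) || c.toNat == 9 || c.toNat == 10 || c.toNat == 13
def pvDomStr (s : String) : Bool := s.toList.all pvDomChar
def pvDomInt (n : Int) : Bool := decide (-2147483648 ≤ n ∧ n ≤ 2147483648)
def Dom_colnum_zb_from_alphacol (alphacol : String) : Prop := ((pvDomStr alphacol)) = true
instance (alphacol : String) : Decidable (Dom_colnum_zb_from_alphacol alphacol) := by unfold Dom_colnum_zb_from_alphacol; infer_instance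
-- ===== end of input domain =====

-- B replaces A's reverse-and-sum-powers loop by a single forward Horner pass (objective: simpler).

-- ===== PORT A =====
-- the assert is not modelled: Pre_ admits exactly the inputs where it holds (every character an uppercase letter)
def colnum_zb_from_alphacol (alphacol : String) : Int :=
  let reversed_chars := alphacol.toList.reverse
  (PySem.List.enumerate reversed_chars).foldl
    (fun total pc =>
      let digit_value : Int := (pc.2.toNat : Int) - 65
      let digit_value := if pc.1 > 0 then digit_value + 1 else digit_value
      total + digit_value * 26 ^ pc.1.toNat) 0

-- ===== PORT B =====
def colnum_zb_from_alphacol_alt (alphacol : String) : Int :=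
  let total := alphacol.toList.foldl (fun t c => t * 26 + ((c.toNat : Int) - 64)) 0
  if alphacol.toList = [] then 0 else total - 1

-- ===== PRECONDITION & SPEC =====
-- Pre_ excludes exactly the strings containing a character that is not an uppercase letter, on which the assert raises AssertionError (in both A and B).
def Pre_colnum_zb_from_alphacol (alphacol : String) : Prop :=
  alphacol.toList.all (fun c => 65 ≤ c.toNat && c.toNat ≤ 90) = true
instance (alphacol : String) : Decidable (Pre_colnum_zb_from_alphacol alphacol) := by unfold Pre_colnum_zb_from_alphacol; infer_instance
def pvWitness_colnum_zb_from_alphacol : String := "AZ"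

def Spec_colnum_zb_from_alphacol (alphacol : String) (out : Int) : Prop := out = colnum_zb_from_alphacol_alt alphacol
instance (alphacol : String) (out : Int) : Decidable (Spec_colnum_zb_from_alphacol alphacol out) := by unfold Spec_colnum_zb_from_alphacol; infer_instance

-- ===== CLAIM (what is proved, stated in full; the proofs are below) =====
def Claim_equal_colnum_zb_from_alphacol : Prop := ∀ (alphacol : String), Dom_colnum_zb_from_alphacol alphacol → Pre_colnum_zb_from_alphacol alphacol → Spec_colnum_zb_from_alphacol alphacol (colnum_zb_from_alphacol alphacol)

-- ===== LEMMAS AND PROOFS =====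

-- A's loop, as a function of the (already reversed) character list
def pvAStep (total : Int) (pc : Int × Char) : Int :=
  let digit_value : Int := (pc.2.toNat : Int) - 65
  let digit_value := if pc.1 > 0 then digit_value + 1 else digit_value
  total + digit_value * 26 ^ pc.1.toNat

def pvALoop (l : List Char) : Int := (PySem.List.enumerate l.reverse).foldl pvAStep 0

-- B's Horner fold with an arbitrary accumulator
def pvHorner (a : Int) (l : List Char) : Int := l.foldl (fun t c => t * 26 + ((c.toNat : Int) - 64)) a

theorem pvHorner_shift (l : List Char) (a : Int) :
    pvHorner a l = a * 26 ^ l.length + pvHorner 0 l := by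
  induction l generalizing a with
  | nil => simp [pvHorner]
  | cons c rest ih =>
    show pvHorner (a * 26 + ((c.toNat : Int) - 64)) rest =
      a * 26 ^ (c :: rest).length + pvHorner (0 * 26 + ((c.toNat : Int) - 64)) rest
    rw [ih, ih (0 * 26 + ((c.toNat : Int) - 64)), List.length_cons]
    ring

theorem pvALoop_eq_horner (c : Char) (rest : List Char) :
    pvALoop (c :: rest) = pvHorner 0 (c :: rest) - 1 := by
  induction rest generalizing c with
  | nil =>
    simp [pvALoop, pvAStep, PySem.List.enumerate, pvHorner]
    ring
  | cons c' rs ih =>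
    have h1 : pvALoop (c :: c' :: rs) = pvAStep (pvALoop (c' :: rs)) (((c' :: rs).length : Int), c) := by
      simp [pvALoop, List.reverse_cons, PySem.List.enumerate_append, List.foldl_append,
        PySem.List.enumerate_cons, PySem.List.enumerate_nil]
    rw [h1, ih c']
    have h2 : pvHorner 0 (c :: c' :: rs) = ((c.toNat : Int) - 64) * 26 ^ (c' :: rs).length + pvHorner 0 (c' :: rs) := by
      have : pvHorner 0 (c :: c' :: rs) = pvHorner (0 * 26 + ((c.toNat : Int) - 64)) (c' :: rs) := rfl
      rw [this, pvHorner_shift]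
      ring
    rw [h2]
    simp only [pvAStep, List.length_cons, Int.toNat_natCast]
    rw [if_pos (by positivity : (((rs.length + 1 : Nat) : Int) > 0))]
    ring

-- ===== VERDICT (by name: the statement is the Claim_ definition above) =====
theorem colnum_zb_from_alphacol_spec : Claim_equal_colnum_zb_from_alphacol := by
  intro alphacol _ _
  show colnum_zb_from_alphacol alphacol = colnum_zb_from_alphacol_alt alphacol
  have hA : colnum_zb_from_alphacol alphacol = pvALoop alphacol.toList := rfl
  rw [hA]
  unfold colnum_zb_from_alphacol_alt
  cases h : alphacol.toList with
  | nil => simp [pvALoop]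
  | cons c rest =>
    rw [if_neg (by simp)]
    rw [pvALoop_eq_horner]
    rfl
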